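-- pv_equiv track=rewrite | github.com/RyanYunruiYang/elections | schulze.py | path_strength
-- ===== SOURCE A (Python) =====
-- def path_strength(num_cand, d): #finds the path strength between each pair of candidates
--     p = [[0 for i in range(num_cand)] for j in range(num_cand)]
--     for i in range(num_cand):
--         for j in range(num_cand):
--             if (i!=j):
--                 if (d[i][j] > d[j][i]):
--                     p[i][j] = d[i][j]
--                 else:
--                     p[i][j] = 0
--
--     for i in range(num_cand):
--         for j in range(num_cand):
--             if (i!=j):
--                 for k in range(num_cand):
--                     if ((i!=k) and (j!=k)):
--                         p[j][k] = max(p[j][k], min(p[j][i], p[i][k]))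
--     return p
-- ===== SOURCE B (Python) =====
-- def path_strength(num_cand, d):
--     n = num_cand
--     # direct beat strengths: d[a][b] if it beats the reverse pairing, else 0
--     p = [[d[a][b] if a != b and d[a][b] > d[b][a] else 0 for b in range(n)]
--          for a in range(n)]
--     # widest-path (max-min) transitive closure by repeated matrix squaring:
--     # after k squarings p[a][b] is the best bottleneck over walks of <= 2**k edges
--     t = 1
--     while t < n:
--         q = []
--         for a in range(n):
--             row = []
--             for b in range(n):
--                 best = p[a][b]
--                 for k in range(n):
--                     c = min(p[a][k], p[k][b])
--                     if c > best:
--                         best = c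
--                 row.append(best)
--             q.append(row)
--         p = q
--         t *= 2
--     for a in range(n):
--         p[a][a] = 0
--     return p
-- ===== Notes on version B (the rewrite author's own statement) =====
-- stated objective: alternative
-- what changed: replaces A's in-place Floyd-Warshall pivot relaxation with computing the max-min (widest-path) transitive closure by repeated matrix squaring in a doubling while-loop over a fixed base edge matrix, then zeroing the diagonal
import Mathlib
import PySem

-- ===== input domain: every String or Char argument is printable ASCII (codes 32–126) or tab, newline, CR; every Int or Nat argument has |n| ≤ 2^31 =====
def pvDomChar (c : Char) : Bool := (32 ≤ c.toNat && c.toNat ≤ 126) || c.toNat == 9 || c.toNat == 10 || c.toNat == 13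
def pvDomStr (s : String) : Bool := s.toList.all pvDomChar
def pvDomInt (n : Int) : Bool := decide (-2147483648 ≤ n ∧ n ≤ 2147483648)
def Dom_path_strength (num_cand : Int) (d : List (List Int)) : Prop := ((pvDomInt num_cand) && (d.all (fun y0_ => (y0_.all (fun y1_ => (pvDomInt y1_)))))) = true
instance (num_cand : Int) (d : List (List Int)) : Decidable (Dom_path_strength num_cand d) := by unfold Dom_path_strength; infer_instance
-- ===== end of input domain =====

-- B replaces A's in-place Floyd–Warshall pivot relaxation by computing the max–min
-- (widest-path) transitive closure of the beat matrix via repeated matrix squaring in a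
-- doubling while-loop, then zeroing the diagonal (alternative algorithm, not faster).

-- ===== PORT A =====
def path_strength (num_cand : Int) (d : List (List Int)) : List (List Int) :=
  let p0 : List (List Int) :=
    (PySem.List.pyRange 0 num_cand 1).map (fun _j =>
      (PySem.List.pyRange 0 num_cand 1).map (fun _i => (0 : Int)))
  let p1 : List (List Int) :=
    (PySem.List.pyRange 0 num_cand 1).foldl (fun p i =>
      (PySem.List.pyRange 0 num_cand 1).foldl (fun p j =>
        if i ≠ j then
          if PySem.List.pyGetD (PySem.List.pyGetD d i []) j 0 >
              PySem.List.pyGetD (PySem.List.pyGetD d j []) i 0 then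
            PySem.List.pySetD p i (PySem.List.pySetD (PySem.List.pyGetD p i []) j
              (PySem.List.pyGetD (PySem.List.pyGetD d i []) j 0))
          else
            PySem.List.pySetD p i (PySem.List.pySetD (PySem.List.pyGetD p i []) j 0)
        else p) p) p0
  (PySem.List.pyRange 0 num_cand 1).foldl (fun p i =>
    (PySem.List.pyRange 0 num_cand 1).foldl (fun p j =>
      if i ≠ j then
        (PySem.List.pyRange 0 num_cand 1).foldl (fun p k =>
          if i ≠ k ∧ j ≠ k then
            PySem.List.pySetD p j (PySem.List.pySetD (PySem.List.pyGetD p j []) k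
              (max (PySem.List.pyGetD (PySem.List.pyGetD p j []) k 0)
                (min (PySem.List.pyGetD (PySem.List.pyGetD p j []) i 0)
                     (PySem.List.pyGetD (PySem.List.pyGetD p i []) k 0))))
          else p) p
      else p) p) p1

-- ===== PORT B =====
-- one max-min matrix squaring round (Source B's inner triple loop; 'if c > best' kept as an ite)
def pvBSq (n : Int) (p : List (List Int)) : List (List Int) :=
  (PySem.List.pyRange 0 n 1).map (fun a =>
    (PySem.List.pyRange 0 n 1).map (fun b =>
      (PySem.List.pyRange 0 n 1).foldl (fun best k =>
        if min (PySem.List.pyGetD (PySem.List.pyGetD p a []) k 0)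
               (PySem.List.pyGetD (PySem.List.pyGetD p k []) b 0) > best then
          min (PySem.List.pyGetD (PySem.List.pyGetD p a []) k 0)
              (PySem.List.pyGetD (PySem.List.pyGetD p k []) b 0)
        else best)
        (PySem.List.pyGetD (PySem.List.pyGetD p a []) b 0)))

-- Source B's 'while t < n: p = square(p); t *= 2' (the 1 ≤ t argument only proves termination)
def pvBWhile (n : Int) (p : List (List Int)) (t : Int) (ht : 1 ≤ t) : List (List Int) :=
  if h : t < n then pvBWhile n (pvBSq n p) (2 * t) (by omega) else p
termination_by (n - t).toNat
decreasing_by omega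

def path_strength_alt (num_cand : Int) (d : List (List Int)) : List (List Int) :=
  (PySem.List.pyRange 0 num_cand 1).foldl (fun p a =>
    PySem.List.pySetD p a (PySem.List.pySetD (PySem.List.pyGetD p a []) a 0))
    (pvBWhile num_cand
      ((PySem.List.pyRange 0 num_cand 1).map (fun a =>
        (PySem.List.pyRange 0 num_cand 1).map (fun b =>
          if a ≠ b ∧ PySem.List.pyGetD (PySem.List.pyGetD d a []) b 0 >
                      PySem.List.pyGetD (PySem.List.pyGetD d b []) a 0 then
            PySem.List.pyGetD (PySem.List.pyGetD d a []) b 0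
          else 0)))
      1 (by norm_num))

-- ===== PRECONDITION & SPEC =====
-- Exactly the inputs on which the Python A returns (otherwise it raises IndexError):
-- for num_cand ≥ 2 it reads d[i][j] for all i ≠ j below num_cand, so d needs num_cand rows,
-- rows 0..num_cand-2 need num_cand entries and row num_cand-1 needs num_cand-1 entries;
-- for num_cand ≤ 1 nothing is read.
def Pre_path_strength (num_cand : Int) (d : List (List Int)) : Prop :=
  2 ≤ num_cand →
    (num_cand ≤ (d.length : Int) ∧
     (∀ i ∈ List.range (num_cand.toNat - 1), num_cand ≤ ((d.getD i []).length : Int)) ∧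
     num_cand - 1 ≤ ((d.getD (num_cand.toNat - 1) []).length : Int))
instance (num_cand : Int) (d : List (List Int)) : Decidable (Pre_path_strength num_cand d) := by
  unfold Pre_path_strength; infer_instance
def pvWitness_path_strength : Int × List (List Int) := (2, [[0, 3], [1, 0]])

def Spec_path_strength (num_cand : Int) (d : List (List Int)) (out : List (List Int)) : Prop := out = path_strength_alt num_cand d
instance (num_cand : Int) (d : List (List Int)) (out : List (List Int)) : Decidable (Spec_path_strength num_cand d out) := by unfold Spec_path_strength; infer_instance

-- ===== CLAIM (what is proved, stated in full; the proofs are below) =====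
def Claim_equal_path_strength : Prop := ∀ (num_cand : Int) (d : List (List Int)), Dom_path_strength num_cand d → Pre_path_strength num_cand d → Spec_path_strength num_cand d (path_strength num_cand d)

-- ===== LEMMAS AND PROOFS =====

set_option maxHeartbeats 1000000

-- matrix-as-function view used by the proofs
def pvMk (n : Nat) (f : Nat → Nat → Int) : List (List Int) :=
  (List.range n).map (fun a => (List.range n).map (fun b => f a b))

-- d[a][b] as read by both ports
def pvDd (d : List (List Int)) (a b : Nat) : Int :=
  PySem.List.pyGetD (PySem.List.pyGetD d (a : Int) []) (b : Int) 0

-- the beat ("edge weight") matrix both programs start from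
def pvWf (d : List (List Int)) (a b : Nat) : Int :=
  if a ≠ b ∧ pvDd d a b > pvDd d b a then pvDd d a b else 0

-- A's pivot recursion: value after processing pivots 0..m-1
def pvGg (w : Nat → Nat → Int) : Nat → Nat → Nat → Int
  | 0 => w
  | m + 1 => fun a b =>
      if a ≠ m ∧ b ≠ m ∧ b ≠ a then
        max (pvGg w m a b) (min (pvGg w m a m) (pvGg w m m b))
      else pvGg w m a b

-- one squaring round, as a function matrix
def pvSqF (n : Nat) (f : Nat → Nat → Int) (a b : Nat) : Int :=
  (List.range n).foldl (fun best k => max best (min (f a k) (f k b))) (f a b)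

-- t squaring rounds
def pvIt (n : Nat) : Nat → (Nat → Nat → Int) → (Nat → Nat → Int)
  | 0, f => f
  | t + 1, f => pvIt n t (pvSqF n f)

-- number of rounds Source B's while loop performs
def pvCnt (n t : Int) (ht : 1 ≤ t) : Nat :=
  if h : t < n then pvCnt n (2 * t) (by omega) + 1 else 0
termination_by (n - t).toNat
decreasing_by omega

-- bottleneck value of the walk a → l → b over edge weights w
def pvBn (w : Nat → Nat → Int) : Nat → List Nat → Nat → Int
  | a, [], b => w a b
  | a, x :: l, b => min (w a x) (pvBn w x l b)

lemma pvRange_cast (b : Int) :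
    PySem.List.pyRange 0 b 1 = (List.range b.toNat).map (fun k : Nat => (k : Int)) := by
  rw [PySem.List.pyRange_one]; simp only [Int.sub_zero, Int.zero_add]

lemma pvMk_row {n : Nat} (f : Nat → Nat → Int) {a : Nat} (ha : a < n) :
    PySem.List.pyGetD (pvMk n f) (a : Int) [] = (List.range n).map (fun b => f a b) := by
  simp [pvMk, List.getD_eq_getElem?_getD, ha]

lemma pvMk_entry {n : Nat} (f : Nat → Nat → Int) {a b : Nat} (ha : a < n) (hb : b < n) :
    PySem.List.pyGetD (PySem.List.pyGetD (pvMk n f) (a : Int) []) (b : Int) 0 = f a b := by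
  rw [pvMk_row f ha]
  simp [List.getD_eq_getElem?_getD, hb]

lemma pv_set_map_range {n : Nat} (g : Nat → Int) {m : Nat} (_hm : m < n) (v : Int) :
    ((List.range n).map g).set m v
      = (List.range n).map (fun b => if b = m then v else g b) := by
  apply List.ext_getElem
  · simp
  · intro i h1 h2
    simp only [List.getElem_set, List.getElem_map, List.getElem_range] at *
    rcases eq_or_ne i m with h | h
    · simp [h]
    · simp [h, Ne.symm h]

lemma pvMk_set {n : Nat} (f : Nat → Nat → Int) {m : Nat} (_hm : m < n) (g : Nat → Int) :
    (pvMk n f).set m ((List.range n).map g)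
      = pvMk n (fun a b => if a = m then g b else f a b) := by
  unfold pvMk
  apply List.ext_getElem
  · simp
  · intro i h1 h2
    simp only [List.getElem_set, List.getElem_map, List.getElem_range] at *
    rcases eq_or_ne i m with h | h
    · simp [h]
    · simp [h, Ne.symm h]

lemma pvMk_congr {n : Nat} {f f' : Nat → Nat → Int}
    (h : ∀ a, a < n → ∀ b, b < n → f a b = f' a b) : pvMk n f = pvMk n f' := by
  unfold pvMk
  refine List.map_congr_left (fun a ha => List.map_congr_left (fun b hb => ?_))
  exact h a (List.mem_range.mp ha) b (List.mem_range.mp hb)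

-- ===== phase 1 of A: filling the edge-weight matrix =====

lemma pvFillRow (n : Nat) (d : List (List Int)) (i : Nat) (hi : i < n)
    (l : List Nat) (hl : ∀ x ∈ l, x < n) (hnd : l.Nodup) (f : Nat → Nat → Int) :
    List.foldl (fun x (j : Nat) =>
      if (↑i : Int) ≠ ↑j then
        if PySem.List.pyGetD (PySem.List.pyGetD d ↑i []) (↑j) 0 >
            PySem.List.pyGetD (PySem.List.pyGetD d ↑j []) (↑i) 0 then
          PySem.List.pySetD x (↑i) (PySem.List.pySetD (PySem.List.pyGetD x ↑i []) (↑j)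
            (PySem.List.pyGetD (PySem.List.pyGetD d ↑i []) (↑j) 0))
        else PySem.List.pySetD x (↑i) (PySem.List.pySetD (PySem.List.pyGetD x ↑i []) (↑j) 0)
      else x) (pvMk n f) l
    = pvMk n (fun a b => if a = i ∧ b ∈ l ∧ b ≠ i then
        (if pvDd d i b > pvDd d b i then pvDd d i b else 0) else f a b) := by
  induction l generalizing f with
  | nil => exact (pvMk_congr (by intro a ha b hb; simp)).symm
  | cons j l ih =>
    have hj : j < n := hl j (List.mem_cons_self)
    have hl' : ∀ x ∈ l, x < n := fun x hx => hl x (List.mem_cons_of_mem _ hx)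
    have hjl : j ∉ l := (List.nodup_cons.mp hnd).1
    have hnd' : l.Nodup := (List.nodup_cons.mp hnd).2
    simp only [List.foldl_cons]
    by_cases hji : j = i
    · subst hji
      rw [if_neg (by simp)]
      rw [ih hl' hnd' f]
      clear ih hl hl' hnd hnd'
      apply pvMk_congr
      intro a ha b hb
      by_cases h1 : a = j <;> by_cases h2 : b ∈ l <;> by_cases h3 : b = j <;> simp_all
    · rw [if_pos (by exact_mod_cast (show i ≠ j from fun h => hji h.symm))]
      have hstep : (if PySem.List.pyGetD (PySem.List.pyGetD d ↑i []) (↑j) 0 >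
            PySem.List.pyGetD (PySem.List.pyGetD d ↑j []) (↑i) 0 then
          PySem.List.pySetD (pvMk n f) (↑i) (PySem.List.pySetD (PySem.List.pyGetD (pvMk n f) ↑i []) (↑j)
            (PySem.List.pyGetD (PySem.List.pyGetD d ↑i []) (↑j) 0))
        else PySem.List.pySetD (pvMk n f) (↑i) (PySem.List.pySetD (PySem.List.pyGetD (pvMk n f) ↑i []) (↑j) 0))
          = pvMk n (fun a b => if a = i ∧ b = j then
              (if PySem.List.pyGetD (PySem.List.pyGetD d ↑i []) (↑j) 0 >
                  PySem.List.pyGetD (PySem.List.pyGetD d ↑j []) (↑i) 0 then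
                PySem.List.pyGetD (PySem.List.pyGetD d ↑i []) (↑j) 0 else 0) else f a b) := by
        rw [pvMk_row f hi]
        split_ifs with hc
        · simp only [PySem.List.pySetD_natCast, pv_set_map_range (fun b => f i b) hj,
            pvMk_set f hi]
          apply pvMk_congr
          intro a ha b hb
          by_cases h1 : a = i <;> by_cases h2 : b = j <;> simp_all
        · simp only [PySem.List.pySetD_natCast, pv_set_map_range (fun b => f i b) hj,
            pvMk_set f hi]
          apply pvMk_congr
          intro a ha b hb
          by_cases h1 : a = i <;> by_cases h2 : b = j <;> simp_all
      rw [hstep, ih hl' hnd']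
      clear ih hl hl' hnd hnd' hstep
      apply pvMk_congr
      intro a ha b hb
      by_cases h1 : a = i <;> by_cases h2 : b ∈ l <;> by_cases h3 : b = j <;>
        by_cases h4 : b = i <;> simp_all [pvDd]

lemma pvFillAll (n : Nat) (d : List (List Int))
    (l : List Nat) (hl : ∀ x ∈ l, x < n) (hnd : l.Nodup) (f : Nat → Nat → Int) :
    List.foldl (fun x (i : Nat) =>
      List.foldl (fun x (j : Nat) =>
        if (↑i : Int) ≠ ↑j then
          if PySem.List.pyGetD (PySem.List.pyGetD d ↑i []) (↑j) 0 >
              PySem.List.pyGetD (PySem.List.pyGetD d ↑j []) (↑i) 0 then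
            PySem.List.pySetD x (↑i) (PySem.List.pySetD (PySem.List.pyGetD x ↑i []) (↑j)
              (PySem.List.pyGetD (PySem.List.pyGetD d ↑i []) (↑j) 0))
          else PySem.List.pySetD x (↑i) (PySem.List.pySetD (PySem.List.pyGetD x ↑i []) (↑j) 0)
        else x) x (List.range n)) (pvMk n f) l
    = pvMk n (fun a b => if a ∈ l ∧ b ≠ a then
        (if pvDd d a b > pvDd d b a then pvDd d a b else 0) else f a b) := by
  induction l generalizing f with
  | nil => exact (pvMk_congr (by intro a ha b hb; simp)).symm
  | cons i l ih =>
    have hi : i < n := hl i (List.mem_cons_self)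
    have hl' : ∀ x ∈ l, x < n := fun x hx => hl x (List.mem_cons_of_mem _ hx)
    have hil : i ∉ l := (List.nodup_cons.mp hnd).1
    have hnd' : l.Nodup := (List.nodup_cons.mp hnd).2
    simp only [List.foldl_cons]
    rw [pvFillRow n d i hi (List.range n) (by simp) (List.nodup_range) f]
    rw [ih hl' hnd']
    clear ih hl hl' hnd hnd'
    apply pvMk_congr
    intro a ha b hb
    by_cases h1 : a ∈ l <;> by_cases h2 : a = i <;> by_cases h3 : b = a <;>
      simp_all [List.mem_range]

-- ===== phase 2 of A: one pivot round =====

lemma pvInner2 (n : Nat) (i j : Nat) (hi : i < n) (hj : j < n) (hij : i ≠ j)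
    (l : List Nat) (hl : ∀ x ∈ l, x < n) (hnd : l.Nodup) (f : Nat → Nat → Int) :
    List.foldl (fun x (k : Nat) =>
      if (↑i : Int) ≠ ↑k ∧ (↑j : Int) ≠ ↑k then
        PySem.List.pySetD x (↑j) (PySem.List.pySetD (PySem.List.pyGetD x ↑j []) (↑k)
          (max (PySem.List.pyGetD (PySem.List.pyGetD x ↑j []) (↑k) 0)
            (min (PySem.List.pyGetD (PySem.List.pyGetD x ↑j []) (↑i) 0)
              (PySem.List.pyGetD (PySem.List.pyGetD x ↑i []) (↑k) 0))))
      else x) (pvMk n f) l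
    = pvMk n (fun a b => if a = j ∧ b ∈ l ∧ b ≠ i ∧ b ≠ j then
        max (f j b) (min (f j i) (f i b)) else f a b) := by
  induction l generalizing f with
  | nil => exact (pvMk_congr (by intro a ha b hb; simp)).symm
  | cons k l ih =>
    have hk : k < n := hl k (List.mem_cons_self)
    have hl' : ∀ x ∈ l, x < n := fun x hx => hl x (List.mem_cons_of_mem _ hx)
    have hkl : k ∉ l := (List.nodup_cons.mp hnd).1
    have hnd' : l.Nodup := (List.nodup_cons.mp hnd).2
    simp only [List.foldl_cons]
    by_cases hki : k = i
    · subst hki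
      rw [if_neg (by simp)]
      rw [ih hl' hnd' f]
      clear ih hl hl' hnd hnd'
      apply pvMk_congr
      intro a ha b hb
      by_cases h1 : a = j <;> by_cases h2 : b ∈ l <;> by_cases h3 : b = k <;> simp_all
    · by_cases hkj : k = j
      · subst hkj
        rw [if_neg (by simp)]
        rw [ih hl' hnd' f]
        clear ih hl hl' hnd hnd'
        apply pvMk_congr
        intro a ha b hb
        by_cases h1 : a = k <;> by_cases h2 : b ∈ l <;> by_cases h3 : b = k <;> simp_all
      · have hik' : (↑i : Int) ≠ ↑k := by
          exact_mod_cast (show i ≠ k from fun h => hki h.symm)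
        have hjk' : (↑j : Int) ≠ ↑k := by
          exact_mod_cast (show j ≠ k from fun h => hkj h.symm)
        rw [if_pos ⟨hik', hjk'⟩]
        rw [pvMk_entry f hj hk, pvMk_entry f hj hi, pvMk_entry f hi hk, pvMk_row f hj]
        have hset : PySem.List.pySetD (pvMk n f) ((j : Nat) : Int)
              (PySem.List.pySetD ((List.range n).map (fun b => f j b)) ((k : Nat) : Int)
                (max (f j k) (min (f j i) (f i k))))
            = pvMk n (fun a b => if a = j then
                (if b = k then max (f j k) (min (f j i) (f i k)) else f j b) else f a b) := by
          simp only [PySem.List.pySetD_natCast, pv_set_map_range (fun b => f j b) hk,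
            pvMk_set f hj]
        rw [hset, ih hl' hnd']
        clear ih hl hl' hnd hnd'
        apply pvMk_congr
        intro a ha b hb
        by_cases h1 : a = j <;> by_cases h2 : b ∈ l <;> by_cases h3 : b = k <;>
          by_cases h4 : b = i <;> simp_all

lemma pvOuter2 (n : Nat) (i : Nat) (hi : i < n)
    (l : List Nat) (hl : ∀ x ∈ l, x < n) (hnd : l.Nodup) (f : Nat → Nat → Int) :
    List.foldl (fun x (j : Nat) =>
      if (↑i : Int) ≠ ↑j then
        List.foldl (fun x (k : Nat) =>
          if (↑i : Int) ≠ ↑k ∧ (↑j : Int) ≠ ↑k then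
            PySem.List.pySetD x (↑j) (PySem.List.pySetD (PySem.List.pyGetD x ↑j []) (↑k)
              (max (PySem.List.pyGetD (PySem.List.pyGetD x ↑j []) (↑k) 0)
                (min (PySem.List.pyGetD (PySem.List.pyGetD x ↑j []) (↑i) 0)
                  (PySem.List.pyGetD (PySem.List.pyGetD x ↑i []) (↑k) 0))))
          else x) x (List.range n)
      else x) (pvMk n f) l
    = pvMk n (fun a b => if a ∈ l ∧ a ≠ i ∧ b ≠ i ∧ b ≠ a then
        max (f a b) (min (f a i) (f i b)) else f a b) := by
  induction l generalizing f with
  | nil => exact (pvMk_congr (by intro a ha b hb; simp)).symm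
  | cons j l ih =>
    have hj : j < n := hl j (List.mem_cons_self)
    have hl' : ∀ x ∈ l, x < n := fun x hx => hl x (List.mem_cons_of_mem _ hx)
    have hjl : j ∉ l := (List.nodup_cons.mp hnd).1
    have hnd' : l.Nodup := (List.nodup_cons.mp hnd).2
    simp only [List.foldl_cons]
    by_cases hji : j = i
    · subst hji
      rw [if_neg (by simp)]
      rw [ih hl' hnd' f]
      clear ih hl hl' hnd hnd'
      apply pvMk_congr
      intro a ha b hb
      by_cases h1 : a = j <;> by_cases h2 : a ∈ l <;> simp_all
    · rw [if_pos (by exact_mod_cast (show i ≠ j from fun h => hji h.symm))]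
      rw [pvInner2 n i j hi hj (fun h => hji h.symm) (List.range n) (by simp)
        (List.nodup_range) f]
      rw [ih hl' hnd']
      have hij' : ¬ i = j := fun h => hji h.symm
      clear ih hl hl' hnd hnd'
      apply pvMk_congr
      intro a ha b hb
      by_cases h1 : a = j <;> by_cases h2 : a ∈ l <;> by_cases h3 : b = i <;>
        by_cases h4 : b = a <;> simp_all [List.mem_range]

-- ===== A's whole pivot fold equals pvGg =====

lemma pvPivotFold (n : Nat) (w : Nat → Nat → Int) :
    ∀ m, m ≤ n →
    List.foldl (fun x (i : Nat) =>
      List.foldl (fun x (j : Nat) =>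
        if (↑i : Int) ≠ ↑j then
          List.foldl (fun x (k : Nat) =>
            if (↑i : Int) ≠ ↑k ∧ (↑j : Int) ≠ ↑k then
              PySem.List.pySetD x (↑j) (PySem.List.pySetD (PySem.List.pyGetD x ↑j []) (↑k)
                (max (PySem.List.pyGetD (PySem.List.pyGetD x ↑j []) (↑k) 0)
                  (min (PySem.List.pyGetD (PySem.List.pyGetD x ↑j []) (↑i) 0)
                    (PySem.List.pyGetD (PySem.List.pyGetD x ↑i []) (↑k) 0))))
            else x) x (List.range n)
        else x) x (List.range n)) (pvMk n w) (List.range m)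
    = pvMk n (pvGg w m) := by
  intro m
  induction m with
  | zero => intro _; rfl
  | succ m ih =>
    intro hm
    rw [List.range_succ, List.foldl_append, ih (by omega), List.foldl_cons, List.foldl_nil]
    rw [pvOuter2 n m (by omega) (List.range n) (by simp) (List.nodup_range) (pvGg w m)]
    apply pvMk_congr
    intro a ha b hb
    have hmem : a ∈ List.range n := List.mem_range.mpr ha
    show (if a ∈ List.range n ∧ a ≠ m ∧ b ≠ m ∧ b ≠ a then
        max (pvGg w m a b) (min (pvGg w m a m) (pvGg w m m b)) else pvGg w m a b)
      = (if a ≠ m ∧ b ≠ m ∧ b ≠ a then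
        max (pvGg w m a b) (min (pvGg w m a m) (pvGg w m m b)) else pvGg w m a b)
    simp [hmem]

lemma pvA_eq (num_cand : Int) (d : List (List Int)) :
    path_strength num_cand d = pvMk num_cand.toNat (pvGg (pvWf d) num_cand.toNat) := by
  unfold path_strength
  simp only [pvRange_cast, List.foldl_map, List.map_map]
  have h0 : List.map ((fun _j => List.map ((fun _i => (0 : Int)) ∘ fun k : Nat => (↑k : Int))
        (List.range num_cand.toNat)) ∘ fun k : Nat => (↑k : Int)) (List.range num_cand.toNat)
      = pvMk num_cand.toNat (fun _ _ => 0) := by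
    simp [pvMk, Function.comp_def]
  rw [h0]
  rw [pvFillAll num_cand.toNat d (List.range num_cand.toNat) (by simp)
    (List.nodup_range) (fun _ _ => 0)]
  have h2 : pvMk num_cand.toNat (fun a b => if a ∈ List.range num_cand.toNat ∧ b ≠ a then
        (if pvDd d a b > pvDd d b a then pvDd d a b else 0) else (0 : Int))
      = pvMk num_cand.toNat (pvWf d) := by
    apply pvMk_congr
    intro a ha b hb
    rcases eq_or_ne b a with hab | hab
    · simp [hab, pvWf]
    · have hab' : ¬ (a = b) := fun h => hab h.symm
      simp_all [pvWf, List.mem_range]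
  rw [h2]
  exact pvPivotFold num_cand.toNat (pvWf d) num_cand.toNat le_rfl

-- ===== B-side structural lemmas =====

lemma pvIte_max (b c : Int) : (if c > b then c else b) = max b c := by
  by_cases h : c > b
  · rw [if_pos h, max_eq_right (le_of_lt h)]
  · rw [if_neg h, max_eq_left (by omega)]

lemma pvBSq_mk (n : Nat) (f : Nat → Nat → Int) :
    pvBSq (↑n) (pvMk n f) = pvMk n (pvSqF n f) := by
  unfold pvBSq
  rw [pvRange_cast]
  simp only [Int.toNat_natCast, List.map_map, List.foldl_map]
  conv_rhs => rw [pvMk]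
  refine List.map_congr_left (fun a ha => ?_)
  have han : a < n := List.mem_range.mp ha
  simp only [Function.comp_apply]
  refine List.map_congr_left (fun b hb => ?_)
  have hbn : b < n := List.mem_range.mp hb
  simp only [Function.comp_apply]
  rw [pvMk_entry f han hbn]
  unfold pvSqF
  apply PySem.List.foldl_congr_mem
  intro best k hk
  have hkn : k < n := List.mem_range.mp hk
  rw [pvMk_entry f han hkn, pvMk_entry f hkn hbn, pvIte_max]

lemma pvIt_succ (n : Nat) : ∀ (t : Nat) (f : Nat → Nat → Int),
    pvIt n (t + 1) f = pvSqF n (pvIt n t f) := by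
  intro t
  induction t with
  | zero => intro f; rfl
  | succ t ih =>
    intro f
    show pvIt n (t + 1) (pvSqF n f) = _
    rw [ih (pvSqF n f)]
    rfl

lemma pvBWhile_stop (n : Int) (p : List (List Int)) (t : Int) (ht : 1 ≤ t)
    (h : ¬ t < n) : pvBWhile n p t ht = p := by
  rw [pvBWhile]
  simp [h]

lemma pvBWhile_mk (n : Nat) :
    ∀ (c : Nat) (t : Int) (ht : 1 ≤ t), ((n : Int) - t).toNat ≤ c → ∀ f,
    pvBWhile (↑n) (pvMk n f) t ht = pvMk n (pvIt n (pvCnt (↑n) t ht) f) := by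
  intro c
  induction c with
  | zero =>
    intro t ht hc f
    have hnt : ¬ t < (n : Int) := by omega
    rw [pvBWhile, pvCnt]
    simp [hnt, pvIt]
  | succ c ih =>
    intro t ht hc f
    by_cases h : t < (n : Int)
    · rw [pvBWhile, pvCnt]
      simp only [h, dite_true]
      rw [pvBSq_mk n f, ih (2 * t) (by omega) (by omega) (pvSqF n f)]
      rfl
    · rw [pvBWhile, pvCnt]
      simp [h, pvIt]

lemma pvCnt_bound (n : Nat) :
    ∀ (c : Nat) (t : Int) (ht : 1 ≤ t), ((n : Int) - t).toNat ≤ c →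
    (n : Int) ≤ t * 2 ^ (pvCnt (↑n) t ht) := by
  intro c
  induction c with
  | zero =>
    intro t ht hc
    have hnt : ¬ t < (n : Int) := by omega
    rw [pvCnt]
    simp only [hnt, dite_false, pow_zero, mul_one]
    omega
  | succ c ih =>
    intro t ht hc
    by_cases h : t < (n : Int)
    · rw [pvCnt]
      simp only [h, dite_true, pow_succ]
      have := ih (2 * t) (by omega) (by omega)
      nlinarith [this]
    · rw [pvCnt]
      simp only [h, dite_false, pow_zero, mul_one]
      omega

lemma pvDiagFold (n : Nat) (l : List Nat) (hl : ∀ x ∈ l, x < n) (hnd : l.Nodup) :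
    ∀ f, List.foldl (fun p (a : Nat) =>
      PySem.List.pySetD p (↑a) (PySem.List.pySetD (PySem.List.pyGetD p ↑a []) (↑a) 0))
      (pvMk n f) l
    = pvMk n (fun a b => if a ∈ l ∧ b = a then 0 else f a b) := by
  induction l with
  | nil => intro f; exact (pvMk_congr (by intro a ha b hb; simp)).symm
  | cons x l ih =>
    intro f
    have hx : x < n := hl x (List.mem_cons_self)
    have hl' : ∀ y ∈ l, y < n := fun y hy => hl y (List.mem_cons_of_mem _ hy)
    have hxl : x ∉ l := (List.nodup_cons.mp hnd).1
    have hnd' : l.Nodup := (List.nodup_cons.mp hnd).2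
    simp only [List.foldl_cons]
    rw [pvMk_row f hx]
    have hset : PySem.List.pySetD (pvMk n f) ((x : Nat) : Int)
          (PySem.List.pySetD ((List.range n).map (fun b => f x b)) ((x : Nat) : Int) 0)
        = pvMk n (fun a b => if a = x ∧ b = x then 0 else f a b) := by
      simp only [PySem.List.pySetD_natCast, pv_set_map_range (fun b => f x b) hx,
        pvMk_set f hx]
      apply pvMk_congr
      intro a ha b hb
      by_cases h1 : a = x <;> by_cases h2 : b = x <;> simp_all
    rw [hset, ih hl' hnd']
    apply pvMk_congr
    intro a ha b hb
    by_cases h1 : a = x <;> by_cases h2 : a ∈ l <;> by_cases h3 : b = a <;> simp_all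

lemma pvBInit (num_cand : Int) (d : List (List Int)) :
    (PySem.List.pyRange 0 num_cand 1).map (fun a =>
      (PySem.List.pyRange 0 num_cand 1).map (fun b =>
        if a ≠ b ∧ PySem.List.pyGetD (PySem.List.pyGetD d a []) b 0 >
                    PySem.List.pyGetD (PySem.List.pyGetD d b []) a 0 then
          PySem.List.pyGetD (PySem.List.pyGetD d a []) b 0
        else 0))
    = pvMk num_cand.toNat (pvWf d) := by
  rw [pvRange_cast]
  simp only [List.map_map]
  unfold pvMk
  refine List.map_congr_left (fun a ha => ?_)
  simp only [Function.comp_apply]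
  refine List.map_congr_left (fun b hb => ?_)
  simp only [Function.comp_apply, pvWf, pvDd, Ne, Int.natCast_inj]

-- ===== walk bottleneck machinery =====

lemma pvBn_split (w : Nat → Nat → Int) :
    ∀ (l1 : List Nat) (a x : Nat) (l2 : List Nat) (b : Nat),
    pvBn w a (l1 ++ x :: l2) b = min (pvBn w a l1 x) (pvBn w x l2 b) := by
  intro l1
  induction l1 with
  | nil => intro a x l2 b; rfl
  | cons y l1 ih =>
    intro a x l2 b
    show min (w a y) (pvBn w y (l1 ++ x :: l2) b) = min (min (w a y) (pvBn w y l1 x)) _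
    rw [ih, min_assoc]

lemma pvDupSplit : ∀ (l : List Nat), ¬ l.Nodup → ∃ s x t, l = s ++ x :: t ∧ x ∈ t := by
  intro l
  induction l with
  | nil => intro h; exact absurd List.nodup_nil h
  | cons y r ih =>
    intro h
    by_cases hy : y ∈ r
    · exact ⟨[], y, r, rfl, hy⟩
    · have : ¬ r.Nodup := fun hr => h (List.nodup_cons.mpr ⟨hy, hr⟩)
      obtain ⟨s, x, t, hst, hx⟩ := ih this
      exact ⟨y :: s, x, t, by rw [hst]; rfl, hx⟩

lemma pvErase (w : Nat → Nat → Int) :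
    ∀ (N : Nat) (l : List Nat) (a b : Nat), l.length ≤ N →
    ∃ l', l'.Nodup ∧ a ∉ l' ∧ b ∉ l' ∧ (∀ x ∈ l', x ∈ l) ∧
      pvBn w a l b ≤ pvBn w a l' b := by
  intro N
  induction N with
  | zero =>
    intro l a b hlen
    have : l = [] := List.length_eq_zero_iff.mp (by omega)
    subst this
    exact ⟨[], List.nodup_nil, by simp, by simp, by simp, le_rfl⟩
  | succ N ih =>
    intro l a b hlen
    by_cases ha : a ∈ l
    · obtain ⟨s, t, hst⟩ := List.append_of_mem ha
      subst hst
      obtain ⟨l', h1, h2, h3, h4, h5⟩ := ih t a b (by simp at hlen; omega)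
      refine ⟨l', h1, h2, h3, fun x hx => by simp [h4 x hx], ?_⟩
      calc pvBn w a (s ++ a :: t) b = min (pvBn w a s a) (pvBn w a t b) := pvBn_split w s a a t b
        _ ≤ pvBn w a t b := min_le_right _ _
        _ ≤ pvBn w a l' b := h5
    · by_cases hb : b ∈ l
      · obtain ⟨s, t, hst⟩ := List.append_of_mem hb
        subst hst
        obtain ⟨l', h1, h2, h3, h4, h5⟩ := ih s a b (by simp at hlen ⊢; omega)
        refine ⟨l', h1, h2, h3, fun x hx => by simp [h4 x hx], ?_⟩
        calc pvBn w a (s ++ b :: t) b = min (pvBn w a s b) (pvBn w b t b) := pvBn_split w s a b t b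
          _ ≤ pvBn w a s b := min_le_left _ _
          _ ≤ pvBn w a l' b := h5
      · by_cases hnd : l.Nodup
        · exact ⟨l, hnd, ha, hb, fun x hx => hx, le_rfl⟩
        · obtain ⟨s, x, t, hst, hxt⟩ := pvDupSplit l hnd
          obtain ⟨t1, t2, ht⟩ := List.append_of_mem hxt
          subst ht; subst hst
          have hlen2 : (s ++ x :: t2).length ≤ N := by simp at hlen ⊢; omega
          obtain ⟨l', h1, h2, h3, h4, h5⟩ := ih (s ++ x :: t2) a b hlen2
          refine ⟨l', h1, h2, h3, fun y hy => ?_, ?_⟩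
          · have := h4 y hy
            simp at this ⊢
            tauto
          · calc pvBn w a (s ++ x :: (t1 ++ x :: t2)) b
                = min (pvBn w a s x) (pvBn w x (t1 ++ x :: t2) b) := pvBn_split w s a x _ b
              _ = min (pvBn w a s x) (min (pvBn w x t1 x) (pvBn w x t2 b)) := by
                  rw [pvBn_split w t1 x x t2 b]
              _ ≤ min (pvBn w a s x) (pvBn w x t2 b) := by
                  exact min_le_min le_rfl (min_le_right _ _)
              _ = pvBn w a (s ++ x :: t2) b := (pvBn_split w s a x t2 b).symm
              _ ≤ pvBn w a l' b := h5

lemma pvGg_step_le (w : Nat → Nat → Int) (m a b : Nat) :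
    pvGg w m a b ≤ pvGg w (m + 1) a b := by
  show pvGg w m a b ≤ (if a ≠ m ∧ b ≠ m ∧ b ≠ a then _ else _)
  split_ifs with h
  · exact le_max_left _ _
  · exact le_rfl

lemma pvF2 (w : Nat → Nat → Int) :
    ∀ (m : Nat) (l : List Nat) (a b : Nat), a ≠ b → l.Nodup → (∀ x ∈ l, x < m) →
    a ∉ l → b ∉ l → pvBn w a l b ≤ pvGg w m a b := by
  intro m
  induction m with
  | zero =>
    intro l a b _ _ hlt _ _
    cases l with
    | nil => exact le_rfl
    | cons x l => exact absurd (hlt x (List.mem_cons_self)) (by omega)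
  | succ m ih =>
    intro l a b hab hnd hlt ha hb
    by_cases hm : m ∈ l
    · obtain ⟨s, t, hst⟩ := List.append_of_mem hm
      subst hst
      have hsnd : s.Nodup := hnd.of_append_left
      have htnd' : (m :: t).Nodup := hnd.of_append_right
      have htnd : t.Nodup := (List.nodup_cons.mp htnd').2
      have hmt : m ∉ t := (List.nodup_cons.mp htnd').1
      have hms : m ∉ s := fun hms =>
        (List.disjoint_of_nodup_append hnd) hms (List.mem_cons_self)
      have ham : a ≠ m := fun h => ha (h ▸ hm)
      have hbm : b ≠ m := fun h => hb (h ▸ hm)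
      have has : a ∉ s := fun h => ha (by simp [h])
      have hbt : b ∉ t := fun h => hb (by simp [h])
      have h1 : pvBn w a s m ≤ pvGg w m a m :=
        ih s a m ham hsnd (fun x hx => by
          have hx1 := hlt x (by simp [hx])
          have : x ≠ m := fun he => hms (he ▸ hx)
          omega) has hms
      have h2 : pvBn w m t b ≤ pvGg w m m b :=
        ih t m b (fun h => hbm h.symm) htnd (fun x hx => by
          have hx1 := hlt x (by simp [hx])
          have : x ≠ m := fun he => hmt (he ▸ hx)
          omega) hmt hbt
      have hguard : a ≠ m ∧ b ≠ m ∧ b ≠ a := ⟨ham, hbm, fun h => hab h.symm⟩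
      have hstep : pvGg w (m + 1) a b
          = max (pvGg w m a b) (min (pvGg w m a m) (pvGg w m m b)) := by
        show (if a ≠ m ∧ b ≠ m ∧ b ≠ a then _ else _) = _
        rw [if_pos hguard]
      rw [pvBn_split w s a m t b, hstep]
      exact le_trans (min_le_min h1 h2) (le_max_right _ _)
    · have : ∀ x ∈ l, x < m := fun x hx => by
        have := hlt x hx
        have : x ≠ m := fun he => hm (he ▸ hx)
        omega
      exact le_trans (ih l a b hab hnd this ha hb) (pvGg_step_le w m a b)

lemma pvF3 (w : Nat → Nat → Int) :
    ∀ (m : Nat) (a b : Nat), ∃ l, (∀ x ∈ l, x < m) ∧ pvGg w m a b = pvBn w a l b := by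
  intro m
  induction m with
  | zero => intro a b; exact ⟨[], by simp, rfl⟩
  | succ m ih =>
    intro a b
    by_cases hg : a ≠ m ∧ b ≠ m ∧ b ≠ a
    · rcases le_total (min (pvGg w m a m) (pvGg w m m b)) (pvGg w m a b) with h | h
      · obtain ⟨l, hl, he⟩ := ih a b
        refine ⟨l, fun x hx => by have := hl x hx; omega, ?_⟩
        show (if a ≠ m ∧ b ≠ m ∧ b ≠ a then _ else _) = _
        rw [if_pos hg, max_eq_left h, he]
      · obtain ⟨l1, hl1, he1⟩ := ih a m
        obtain ⟨l2, hl2, he2⟩ := ih m b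
        refine ⟨l1 ++ m :: l2, ?_, ?_⟩
        · intro x hx
          simp at hx
          rcases hx with hx | hx | hx
          · have := hl1 x hx; omega
          · omega
          · have := hl2 x hx; omega
        · show (if a ≠ m ∧ b ≠ m ∧ b ≠ a then _ else _) = _
          rw [if_pos hg, max_eq_right h, pvBn_split w l1 a m l2 b, he1, he2]
    · obtain ⟨l, hl, he⟩ := ih a b
      refine ⟨l, fun x hx => by have := hl x hx; omega, ?_⟩
      show (if a ≠ m ∧ b ≠ m ∧ b ≠ a then _ else _) = _
      rw [if_neg hg, he]

-- ===== squaring-iteration machinery =====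

lemma pvSqF_ge_init (n : Nat) (f : Nat → Nat → Int) (a b : Nat) :
    f a b ≤ pvSqF n f a b :=
  (PySem.List.le_foldl_max_int (List.range n) (fun k => min (f a k) (f k b)) (f a b)).1

lemma pvSqF_ge_elem (n : Nat) (f : Nat → Nat → Int) (a b k : Nat) (hk : k < n) :
    min (f a k) (f k b) ≤ pvSqF n f a b :=
  (PySem.List.le_foldl_max_int (List.range n) (fun k => min (f a k) (f k b)) (f a b)).2
    k (List.mem_range.mpr hk)

lemma pvSqF_mem (n : Nat) (f : Nat → Nat → Int) (a b : Nat) :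
    pvSqF n f a b = f a b ∨ ∃ k, k < n ∧ pvSqF n f a b = min (f a k) (f k b) := by
  have hmap : pvSqF n f a b
      = ((List.range n).map (fun k => min (f a k) (f k b))).foldl max (f a b) := by
    rw [List.foldl_map]; rfl
  rcases PySem.List.foldl_max_mem ((List.range n).map (fun k => min (f a k) (f k b))) (f a b)
    with h | h
  · left; rw [hmap, h]
  · right
    rw [hmap] at *
    obtain ⟨k, hk, he⟩ := List.mem_map.mp h
    exact ⟨k, List.mem_range.mp hk, he.symm⟩

lemma pvIt_step_ge (n : Nat) (w : Nat → Nat → Int) (t a b : Nat) :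
    pvIt n t w a b ≤ pvIt n (t + 1) w a b := by
  rw [pvIt_succ]
  exact pvSqF_ge_init n (pvIt n t w) a b

lemma pvV_achieve (n : Nat) (w : Nat → Nat → Int) :
    ∀ (t : Nat) (a b : Nat), ∃ l, (∀ x ∈ l, x < n) ∧ pvIt n t w a b = pvBn w a l b := by
  intro t
  induction t with
  | zero => intro a b; exact ⟨[], by simp, rfl⟩
  | succ t ih =>
    intro a b
    rw [pvIt_succ]
    rcases pvSqF_mem n (pvIt n t w) a b with h | ⟨k, hk, h⟩
    · obtain ⟨l, hl, he⟩ := ih a b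
      exact ⟨l, hl, by rw [h, he]⟩
    · obtain ⟨l1, hl1, he1⟩ := ih a k
      obtain ⟨l2, hl2, he2⟩ := ih k b
      refine ⟨l1 ++ k :: l2, ?_, ?_⟩
      · intro x hx
        simp at hx
        rcases hx with hx | hx | hx
        · exact hl1 x hx
        · omega
        · exact hl2 x hx
      · rw [h, pvBn_split w l1 a k l2 b, he1, he2]

lemma pvM4 (n : Nat) (w : Nat → Nat → Int) :
    ∀ (t : Nat) (l : List Nat) (a b : Nat), (∀ x ∈ l, x < n) →
    l.length + 1 ≤ 2 ^ t → pvBn w a l b ≤ pvIt n t w a b := by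
  intro t
  induction t with
  | zero =>
    intro l a b _ hlen
    have : l = [] := List.length_eq_zero_iff.mp (by rw [pow_zero] at hlen; omega)
    subst this
    exact le_rfl
  | succ t ih =>
    intro l a b hl hlen
    by_cases h : l.length + 1 ≤ 2 ^ t
    · exact le_trans (ih l a b hl h) (pvIt_step_ge n w t a b)
    · have h2t : 0 < 2 ^ t := Nat.two_pow_pos t
      have hlow : 2 ^ t ≤ l.length := by omega
      set k0 := 2 ^ t - 1 with hk0
      have hk0lt : k0 < l.length := by omega
      have hdrop : l.drop k0 = l[k0] :: l.drop (k0 + 1) := List.drop_eq_getElem_cons hk0lt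
      have hsp : l = l.take k0 ++ l[k0] :: l.drop (k0 + 1) := by
        conv_lhs => rw [← List.take_append_drop k0 l]
        rw [hdrop]
      set x := l[k0] with hx
      have hxn : x < n := hl x (List.getElem_mem hk0lt)
      have htake : (l.take k0).length = k0 := by
        rw [List.length_take]; omega
      have hdroplen : (l.drop (k0 + 1)).length = l.length - (k0 + 1) := by
        rw [List.length_drop]
      have hp2 : 2 ^ (t + 1) = 2 * 2 ^ t := by ring
      have h1 : pvBn w a (l.take k0) x ≤ pvIt n t w a x :=
        ih _ a x (fun y hy => hl y (List.mem_of_mem_take hy)) (by omega)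
      have h2 : pvBn w x (l.drop (k0 + 1)) b ≤ pvIt n t w x b :=
        ih _ x b (fun y hy => hl y (List.mem_of_mem_drop hy)) (by omega)
      calc pvBn w a l b = min (pvBn w a (l.take k0) x) (pvBn w x (l.drop (k0 + 1)) b) := by
            conv_lhs => rw [hsp]
            exact pvBn_split w _ a x _ b
        _ ≤ min (pvIt n t w a x) (pvIt n t w x b) := min_le_min h1 h2
        _ ≤ pvIt n (t + 1) w a b := by
            rw [pvIt_succ]
            exact pvSqF_ge_elem n (pvIt n t w) a b x hxn

lemma pvM3 (n : Nat) (w : Nat → Nat → Int) (l : List Nat) (a b : Nat)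
    (hab : a ≠ b) (hl : ∀ x ∈ l, x < n) : pvBn w a l b ≤ pvGg w n a b := by
  obtain ⟨l', h1, h2, h3, h4, h5⟩ := pvErase w l.length l a b le_rfl
  exact le_trans h5 (pvF2 w n l' a b hab h1 (fun x hx => hl x (h4 x hx)) h2 h3)

lemma pvNodupLen (n : Nat) (l : List Nat) (a : Nat) (hnd : l.Nodup)
    (hl : ∀ x ∈ l, x < n) (ha : a ∉ l) (han : a < n) : l.length + 1 ≤ n := by
  have hnd2 : (a :: l).Nodup := List.nodup_cons.mpr ⟨ha, hnd⟩
  have hsub : (a :: l) ⊆ List.range n := by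
    intro x hx
    rcases List.mem_cons.mp hx with h | h
    · exact List.mem_range.mpr (h ▸ han)
    · exact List.mem_range.mpr (hl x h)
  have := List.Subperm.length_le (List.subperm_of_subset hnd2 hsub)
  simpa using this

lemma pvMain (n : Nat) (w : Nat → Nat → Int) (T : Nat) (hT : n ≤ 2 ^ T)
    (a b : Nat) (han : a < n) (_hbn : b < n) (hab : a ≠ b) :
    pvGg w n a b = pvIt n T w a b := by
  apply le_antisymm
  · obtain ⟨l, hl, he⟩ := pvF3 w n a b
    rw [he]
    obtain ⟨l', h1, h2, h3, h4, h5⟩ := pvErase w l.length l a b le_rfl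
    refine le_trans h5 (pvM4 n w T l' a b (fun x hx => hl x (h4 x hx)) ?_)
    have := pvNodupLen n l' a h1 (fun x hx => hl x (h4 x hx)) h2 han
    omega
  · obtain ⟨l, hl, he⟩ := pvV_achieve n w T a b
    rw [he]
    exact pvM3 n w l a b hab hl

lemma pvGg_diag (w : Nat → Nat → Int) (a : Nat) (hw : w a a = 0) :
    ∀ m, pvGg w m a a = 0 := by
  intro m
  induction m with
  | zero => exact hw
  | succ m ih =>
    show (if a ≠ m ∧ a ≠ m ∧ a ≠ a then _ else _) = 0
    rw [if_neg (by simp)]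
    exact ih

-- ===== VERDICT (by name: the statement is the Claim_ definition above) =====
theorem path_strength_spec : Claim_equal_path_strength := by
  intro num_cand d _ _
  unfold Spec_path_strength
  rw [pvA_eq]
  unfold path_strength_alt
  rw [pvBInit num_cand d]
  by_cases hpos : 0 < num_cand
  · have hcast : ((num_cand.toNat : Nat) : Int) = num_cand := Int.toNat_of_nonneg (by omega)
    set n := num_cand.toNat with hn
    rw [← hcast]
    rw [pvBWhile_mk n (((n : Int) - 1).toNat) 1 (by norm_num) le_rfl (pvWf d)]
    rw [pvRange_cast]
    simp only [Int.toNat_natCast, List.foldl_map]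
    rw [pvDiagFold n (List.range n) (by simp) (List.nodup_range) _]
    have hbound : n ≤ 2 ^ (pvCnt (↑n) 1 (by norm_num)) := by
      have := pvCnt_bound n (((n : Int) - 1).toNat) 1 (by norm_num) le_rfl
      have h2 : ((2 : Int)) ^ (pvCnt (↑n) 1 (by norm_num)) = ((2 ^ (pvCnt (↑n) 1 (by norm_num)) : Nat) : Int) := by
        push_cast; ring
      omega
    apply pvMk_congr
    intro a ha b hb
    by_cases hba : b = a
    · subst hba
      rw [pvGg_diag (pvWf d) b (by simp [pvWf]) n]
      simp [List.mem_range, hb]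
    · rw [if_neg (by simp [hba])]
      exact pvMain n (pvWf d) _ hbound a b ha hb (fun h => hba h.symm)
  · have hn0 : num_cand.toNat = 0 := by omega
    rw [hn0]
    have hp : pvMk 0 (pvWf d) = [] := rfl
    rw [hp, pvBWhile_stop num_cand [] 1 (by norm_num) (by omega)]
    rw [pvRange_cast, hn0]
    simp [pvMk, pvGg]
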